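-- pv_equiv track=rewrite | github.com/Lexiie/PatchPilot | shared/redactor.py | normalize_logs
-- ===== SOURCE A (Python) =====
-- def normalize_logs(raw_log: str, max_lines: int = 200) -> str:
--     """Truncate long logs to keep most relevant failure context.
--
--     If the log is already shorter than max_lines, returns unchanged.
--     Otherwise, looks for error markers and keeps a window of context
--     around each. Falls back to last N lines if no error markers found.
--
--     Args:
--         raw_log: The full raw log text.
--         max_lines: Maximum number of lines to retain.
--
--     Returns:
--         Normalized log string, ≤ max_lines lines.
--     """
--     lines = raw_log.split("\n")
--     if len(lines) <= max_lines:
--         return raw_log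
--
--     error_indicators = ("error", "Error", "ERROR", "FAIL", "failed", "FAILED", "✗", "✖", "×")
--     relevant: list[int] = [
--         i for i, line in enumerate(lines) if any(ind in line for ind in error_indicators)
--     ]
--
--     if not relevant:
--         # No error markers — just keep tail
--         return "\n".join(lines[-max_lines:])
--
--     context_radius = 5
--     selected: set[int] = set()
--     for idx in relevant:
--         for i in range(max(0, idx - context_radius), min(len(lines), idx + context_radius + 1)):
--             selected.add(i)
--
--     sorted_indices = sorted(selected)
--     result: list[str] = []
--     last_idx = -1
--     for idx in sorted_indices:
--         if last_idx != -1 and idx - last_idx > 1: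
--             result.append("... (truncated) ...")
--         result.append(lines[idx])
--         last_idx = idx
--
--     return "\n".join(result[:max_lines])
-- ===== SOURCE B (Python) =====
-- def normalize_logs(raw_log: str, max_lines: int = 200) -> str:
--     """Truncate long logs, keeping context windows around error lines.
--
--     Same behaviour as the original, but instead of expanding every error
--     line into a set of indices and sorting, it builds merged inclusive
--     intervals in one pass and emits them with truncation markers.
--     """
--     lines = raw_log.split("\n")
--     if len(lines) <= max_lines:
--         return raw_log
--
--     error_indicators = ("error", "Error", "ERROR", "FAIL", "failed", "FAILED", "✗", "✖", "×")
--     n = len(lines)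
--     intervals: list[tuple[int, int]] = []
--     cur = None  # open interval [s, e], inclusive
--     for i, line in enumerate(lines):
--         if any(ind in line for ind in error_indicators):
--             s, e = max(0, i - 5), min(n - 1, i + 5)
--             if cur is not None and s <= cur[1] + 1:
--                 cur = (cur[0], e)
--             else:
--                 if cur is not None:
--                     intervals.append(cur)
--                 cur = (s, e)
--     if cur is None:
--         # No error markers — just keep tail
--         return "\n".join(lines[-max_lines:])
--     intervals.append(cur)
--
--     result: list[str] = []
--     for s, e in intervals:
--         if result:
--             result.append("... (truncated) ...")
--         result.extend(lines[s:e + 1])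
--
--     return "\n".join(result[:max_lines])
-- ===== Notes on version B (the rewrite author's own statement) =====
-- stated objective: simpler
-- what changed: Replaces the index set + sort + gap-walk pipeline with a single pass that builds merged inclusive context intervals and then emits each interval's line slice with markers between intervals.
import Mathlib
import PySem

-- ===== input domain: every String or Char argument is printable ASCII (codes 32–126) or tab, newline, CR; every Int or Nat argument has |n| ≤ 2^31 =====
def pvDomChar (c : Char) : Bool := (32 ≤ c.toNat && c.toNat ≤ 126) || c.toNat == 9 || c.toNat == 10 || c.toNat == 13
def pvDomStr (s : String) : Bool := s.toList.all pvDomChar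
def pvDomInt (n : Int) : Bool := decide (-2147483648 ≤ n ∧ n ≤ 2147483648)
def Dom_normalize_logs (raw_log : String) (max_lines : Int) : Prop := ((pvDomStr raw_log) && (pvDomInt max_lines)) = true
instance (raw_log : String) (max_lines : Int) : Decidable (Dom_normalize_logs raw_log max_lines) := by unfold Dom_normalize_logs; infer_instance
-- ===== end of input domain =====

-- B replaces A's "expand each error line into an index set, sort it, walk with a gap test"
-- pipeline by a single pass that merges clamped context intervals and emits their slices.

def pvIndicators : List String :=
  ["error", "Error", "ERROR", "FAIL", "failed", "FAILED", "✗", "✖", "×"]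

-- ===== PORT A =====
def normalize_logs (raw_log : String) (max_lines : Int) : String :=
  let lines := (PySem.Str.split? raw_log "\n").getD []  -- split? is some: sep "\n" ≠ ""
  if PySem.List.len lines ≤ max_lines then raw_log
  else
    let relevant : List Int :=
      ((PySem.List.enumerate lines).filter
        (fun p => pvIndicators.any (fun ind => PySem.Str.isIn ind p.2))).map (·.1)
    if relevant = [] then
      PySem.Str.join "\n" (PySem.List.slice lines (some (-max_lines)) none)
    else
      let context_radius : Int := 5
      let selected : PySem.Set Int :=
        relevant.foldl (fun sel idx =>
          (PySem.List.pyRange (max 0 (idx - context_radius))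
              (min (PySem.List.len lines) (idx + context_radius + 1)) 1).foldl
            (fun sel i => PySem.Set.add sel i) sel) PySem.Set.empty
      let sorted_indices := PySem.List.sorted selected (fun x => x) false
      let res := sorted_indices.foldl
        (fun (st : List String × Int) idx =>
          let r := if st.2 ≠ -1 ∧ idx - st.2 > 1 then st.1 ++ ["... (truncated) ..."] else st.1
          (r ++ [PySem.List.pyGetD lines idx ""], idx)) ([], -1)
      PySem.Str.join "\n" (PySem.List.slice res.1 none (some max_lines))

-- ===== PORT B =====
def normalize_logs_alt (raw_log : String) (max_lines : Int) : String :=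
  let lines := (PySem.Str.split? raw_log "\n").getD []  -- split? is some: sep "\n" ≠ ""
  if PySem.List.len lines ≤ max_lines then raw_log
  else
    let n := PySem.List.len lines
    let st := (PySem.List.enumerate lines).foldl
      (fun (st : List (Int × Int) × Option (Int × Int)) p =>
        if pvIndicators.any (fun ind => PySem.Str.isIn ind p.2) then
          let s := max 0 (p.1 - 5)
          let e := min (n - 1) (p.1 + 5)
          match st.2 with
          | some c => if s ≤ c.2 + 1 then (st.1, some (c.1, e)) else (st.1 ++ [c], some (s, e))
          | none => (st.1, some (s, e))
        else st) ([], none)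
    match st.2 with
    | none => PySem.Str.join "\n" (PySem.List.slice lines (some (-max_lines)) none)
    | some c =>
      let intervals := st.1 ++ [c]
      let result := intervals.foldl
        (fun (res : List String) p =>
          (if res = [] then res else res ++ ["... (truncated) ..."]) ++
            PySem.List.slice lines (some p.1) (some (p.2 + 1))) []
      PySem.Str.join "\n" (PySem.List.slice result none (some max_lines))

-- ===== PRECONDITION & SPEC =====
def Spec_normalize_logs (raw_log : String) (max_lines : Int) (out : String) : Prop := out = normalize_logs_alt raw_log max_lines
instance (raw_log : String) (max_lines : Int) (out : String) : Decidable (Spec_normalize_logs raw_log max_lines out) := by unfold Spec_normalize_logs; infer_instance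

-- ===== CLAIM (what is proved, stated in full; the proofs are below) =====
def Claim_equal_normalize_logs : Prop := ∀ (raw_log : String) (max_lines : Int), Dom_normalize_logs raw_log max_lines → Spec_normalize_logs raw_log max_lines (normalize_logs raw_log max_lines)

-- ===== LEMMAS AND PROOFS =====

def pvMarker : String := "... (truncated) ..."

/-- The context window of indices A selects for an error line `i`. -/
def pvWin (n i : Int) : List Int :=
  PySem.List.pyRange (max 0 (i - 5)) (min n (i + 5 + 1)) 1

/-- One step of A's marker walk over the sorted selected indices. -/
def pvStepA (lines : List String) (st : List String × Int) (idx : Int) : List String × Int :=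
  let r := if st.2 ≠ -1 ∧ idx - st.2 > 1 then st.1 ++ [pvMarker] else st.1
  (r ++ [PySem.List.pyGetD lines idx ""], idx)

/-- One step of B's interval-merging pass (on an error index). -/
def pvStepB (n : Int) (st : List (Int × Int) × Option (Int × Int)) (i : Int) :
    List (Int × Int) × Option (Int × Int) :=
  let s := max 0 (i - 5)
  let e := min (n - 1) (i + 5)
  match st.2 with
  | some c => if s ≤ c.2 + 1 then (st.1, some (c.1, e)) else (st.1 ++ [c], some (s, e))
  | none => (st.1, some (s, e))

/-- One step of B's emitting pass. -/
def pvEmit (lines : List String) (res : List String) (p : Int × Int) : List String :=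
  (if res = [] then res else res ++ [pvMarker]) ++
    PySem.List.slice lines (some p.1) (some (p.2 + 1))

/-- `pvEmit` with the slice written as a map over the index range. -/
def pvEmitR (lines : List String) (res : List String) (p : Int × Int) : List String :=
  (if res = [] then res else res ++ [pvMarker]) ++
    (PySem.List.pyRange p.1 (p.2 + 1) 1).map (fun x => PySem.List.pyGetD lines x "")

/-- Well-formed interval list: in-bounds, nonempty, separated by gaps ≥ 2. -/
def pvChain (n : Int) : List (Int × Int) → Prop
  | [] => True
  | [p] => 0 ≤ p.1 ∧ p.1 ≤ p.2 ∧ p.2 ≤ n - 1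
  | p :: q :: rest => (0 ≤ p.1 ∧ p.1 ≤ p.2 ∧ p.2 ≤ n - 1) ∧ p.2 + 1 < q.1 ∧ pvChain n (q :: rest)

/-- All indices covered by an interval list, in order. -/
def pvFlat (ivs : List (Int × Int)) : List Int :=
  ivs.flatMap (fun p => PySem.List.pyRange p.1 (p.2 + 1) 1)

lemma mem_pvFlat (ivs : List (Int × Int)) (x : Int) :
    x ∈ pvFlat ivs ↔ ∃ p ∈ ivs, p.1 ≤ x ∧ x ≤ p.2 := by
  simp only [pvFlat, List.mem_flatMap, PySem.List.mem_pyRange_one]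
  constructor <;> rintro ⟨p, hp, h1, h2⟩ <;> exact ⟨p, hp, by omega, by omega⟩

lemma pvChain_bounds {n : Int} : ∀ {ivs : List (Int × Int)}, pvChain n ivs →
    ∀ p ∈ ivs, 0 ≤ p.1 ∧ p.1 ≤ p.2 ∧ p.2 ≤ n - 1
  | [], _, p, hp => by simp at hp
  | [q], h, p, hp => by rw [List.mem_singleton] at hp; subst hp; exact h
  | q :: r :: rest, h, p, hp => by
    rcases List.mem_cons.mp hp with rfl | hp
    · exact h.1
    · exact pvChain_bounds h.2.2 p hp

lemma pvChain_snoc_update {n : Int} : ∀ {done : List (Int × Int)} {s e e' : Int},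
    pvChain n (done ++ [(s, e)]) → e ≤ e' → e' ≤ n - 1 → pvChain n (done ++ [(s, e')])
  | [], s, e, e', h, h1, h2 => by
    simp only [List.nil_append] at *
    obtain ⟨a1, a2, a3⟩ := h
    exact ⟨a1, by omega, by omega⟩
  | [q], s, e, e', h, h1, h2 => by
    simp only [List.cons_append, List.nil_append] at *
    obtain ⟨a1, a2, b1, b2, b3⟩ := h
    exact ⟨a1, a2, b1, by omega, by omega⟩
  | q :: r :: rest, s, e, e', h, h1, h2 => by
    simp only [List.cons_append] at *
    exact ⟨h.1, h.2.1, pvChain_snoc_update (done := r :: rest) h.2.2 h1 h2⟩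

lemma pvChain_snoc {n : Int} : ∀ {done : List (Int × Int)} {s e s' e' : Int},
    pvChain n (done ++ [(s, e)]) → e + 1 < s' → 0 ≤ s' → s' ≤ e' → e' ≤ n - 1 →
    pvChain n ((done ++ [(s, e)]) ++ [(s', e')])
  | [], s, e, s', e', h, h1, h2, h3, h4 => by
    simp only [List.nil_append, List.cons_append] at *
    obtain ⟨a1, a2, a3⟩ := h
    exact ⟨⟨a1, a2, a3⟩, h1, h2, h3, h4⟩
  | [q], s, e, s', e', h, h1, h2, h3, h4 => by
    simp only [List.cons_append, List.nil_append] at *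
    obtain ⟨a1, a2, b1, b2, b3⟩ := h
    exact ⟨a1, a2, ⟨b1, b2, b3⟩, h1, h2, h3, h4⟩
  | q :: r :: rest, s, e, s', e', h, h1, h2, h3, h4 => by
    simp only [List.cons_append] at *
    exact ⟨h.1, h.2.1, pvChain_snoc (done := r :: rest) h.2.2 h1 h2 h3 h4⟩

lemma pvChain_tail {n : Int} {p : Int × Int} {ivs : List (Int × Int)}
    (h : pvChain n (p :: ivs)) : pvChain n ivs := by
  match ivs with
  | [] => trivial
  | q :: rest => exact h.2.2

lemma pairwise_pyRange_lt (a b : Int) : (PySem.List.pyRange a b 1).Pairwise (· < ·) := by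
  generalize hk : (b - a).toNat = k
  induction k generalizing a with
  | zero => rw [PySem.List.pyRange_one_eq_nil (by omega)]; exact .nil
  | succ k ih =>
    rw [PySem.List.pyRange_one_cons (by omega)]
    refine List.Pairwise.cons ?_ (ih (a + 1) (by omega))
    intro y hy; rw [PySem.List.mem_pyRange_one] at hy; omega

lemma pvFlat_lb {n : Int} : ∀ {ivs : List (Int × Int)} {q : Int × Int}, pvChain n (q :: ivs) →
    ∀ y ∈ pvFlat (q :: ivs), q.1 ≤ y := by
  intro ivs q h y hy
  rcases (mem_pvFlat _ _).mp hy with ⟨p, hp, h1, h2⟩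
  rcases List.mem_cons.mp hp with rfl | hp
  · omega
  · match ivs, h, hp with
    | r :: rest, h, hp =>
      have := pvFlat_lb (n := n) h.2.2 y ((mem_pvFlat _ _).mpr ⟨p, hp, h1, h2⟩)
      have hb := h.1; have := h.2.1; omega

lemma pairwise_pvFlat {n : Int} : ∀ {ivs : List (Int × Int)}, pvChain n ivs →
    (pvFlat ivs).Pairwise (· < ·) := by
  intro ivs h
  match ivs with
  | [] => exact .nil
  | q :: rest =>
    have hrest : (pvFlat rest).Pairwise (· < ·) := pairwise_pvFlat (pvChain_tail h)
    simp only [pvFlat, List.flatMap_cons]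
    rw [List.pairwise_append]
    refine ⟨pairwise_pyRange_lt _ _, hrest, ?_⟩
    intro x hx y hy
    rw [PySem.List.mem_pyRange_one] at hx
    match rest, h with
    | [], _ => simp only [List.flatMap_nil] at hy; exact absurd hy (List.not_mem_nil)
    | r :: rest', h =>
      have := pvFlat_lb (n := n) h.2.2 y hy
      have := h.2.1; omega

lemma mem_foldl_set_add (l : List Int) (s : PySem.Set Int) (x : Int) :
    x ∈ l.foldl PySem.Set.add s ↔ x ∈ s ∨ x ∈ l := by
  induction l generalizing s with
  | nil => simp
  | cons y t ih => rw [List.foldl_cons, ih, PySem.Set.mem_add]; simp; tauto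

lemma nodup_foldl_set_add (l : List Int) (s : PySem.Set Int) (h : s.Nodup) :
    (l.foldl PySem.Set.add s).Nodup := by
  induction l generalizing s with
  | nil => exact h
  | cons y t ih => exact ih _ (PySem.Set.nodup_add s y h)

lemma mem_pvSelected (n : Int) (rel : List Int) (acc : PySem.Set Int) (x : Int) :
    x ∈ rel.foldl (fun sel i => (pvWin n i).foldl PySem.Set.add sel) acc ↔
      x ∈ acc ∨ ∃ i ∈ rel, x ∈ pvWin n i := by
  induction rel generalizing acc with
  | nil => simp
  | cons j t ih => rw [List.foldl_cons, ih, mem_foldl_set_add]; simp; tauto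

lemma nodup_pvSelected (n : Int) (rel : List Int) (acc : PySem.Set Int) (h : acc.Nodup) :
    (rel.foldl (fun sel i => (pvWin n i).foldl PySem.Set.add sel) acc).Nodup := by
  induction rel generalizing acc with
  | nil => exact h
  | cons j t ih => exact ih _ (nodup_foldl_set_add _ _ h)

/-- The invariant of B's merging pass over the (sorted, in-bounds) error indices. -/
lemma pvMerge_inv (n : Int) : ∀ (rel : List Int),
    rel.Pairwise (· < ·) → (∀ i ∈ rel, 0 ≤ i ∧ i < n) → rel ≠ [] →
    ∃ done s e, rel.foldl (pvStepB n) ([], none) = (done, some (s, e)) ∧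
      pvChain n (done ++ [(s, e)]) ∧
      (∃ m ∈ rel, (∀ i ∈ rel, i ≤ m) ∧ e = min (n - 1) (m + 5)) ∧
      (∃ j ∈ rel, s = max 0 (j - 5)) ∧
      (∀ x, (∃ p ∈ done ++ [(s, e)], p.1 ≤ x ∧ x ≤ p.2) ↔
        ∃ i ∈ rel, max 0 (i - 5) ≤ x ∧ x ≤ min (n - 1) (i + 5)) := by
  intro rel
  induction rel using List.reverseRecOn with
  | nil => intro _ _ hne; exact absurd rfl hne
  | append_singleton l i ih =>
    intro hs hbd _
    rw [List.foldl_append, List.foldl_cons, List.foldl_nil]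
    obtain ⟨hi0, hin⟩ := hbd i (by simp)
    obtain ⟨hsl, -, hlt'⟩ := List.pairwise_append.mp hs
    have hlt : ∀ j' ∈ l, j' < i := fun j' hj' => hlt' j' hj' i (by simp)
    rcases eq_or_ne l [] with rfl | hl
    · refine ⟨[], max 0 (i - 5), min (n - 1) (i + 5), rfl, ⟨by omega, by omega, by omega⟩,
        ⟨i, by simp, by simp, rfl⟩, ⟨i, by simp, rfl⟩, ?_⟩
      intro x
      simp only [List.nil_append, List.mem_cons, List.not_mem_nil,
        or_false, exists_eq_left]
    · obtain ⟨done, s, e, hfold, hch, ⟨m, hm, hmax, hme⟩, ⟨j, hj, hjs⟩, hmem⟩ :=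
        ih hsl (fun i' hi' => hbd i' (List.mem_append_left _ hi')) hl
      rw [hfold]
      obtain ⟨hs0, hse, hen⟩ := pvChain_bounds hch (s, e) (List.mem_append_right _ (by simp))
      have hee' : e ≤ min (n - 1) (i + 5) := by have := hlt m hm; omega
      have hss' : s ≤ max 0 (i - 5) := by have := hlt j hj; omega
      by_cases hcase : max 0 (i - 5) ≤ e + 1
      · refine ⟨done, s, min (n - 1) (i + 5),
          by simp only [pvStepB, hcase, if_pos],
          pvChain_snoc_update hch hee' (by omega),
          ⟨i, by simp, fun i' hi' => ?_, rfl⟩,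
          ⟨j, List.mem_append_left _ hj, hjs⟩, ?_⟩
        · rcases List.mem_append.mp hi' with h | h
          · exact le_of_lt (hlt i' h)
          · simp at h; omega
        · intro x
          constructor
          · rintro ⟨p, hp, h1, h2⟩
            rcases List.mem_append.mp hp with hp | hp
            · obtain ⟨i', hi', hw⟩ := (hmem x).mp ⟨p, List.mem_append_left _ hp, h1, h2⟩
              exact ⟨i', List.mem_append_left _ hi', hw⟩
            · simp only [List.mem_singleton] at hp; subst hp
              simp only at h1 h2
              by_cases hx : x ≤ e
              · obtain ⟨i', hi', hw⟩ := (hmem x).mp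
                  ⟨(s, e), List.mem_append_right _ (by simp), h1, hx⟩
                exact ⟨i', List.mem_append_left _ hi', hw⟩
              · exact ⟨i, List.mem_append_right _ (by simp), by omega, by omega⟩
          · rintro ⟨i', hi', h1, h2⟩
            rcases List.mem_append.mp hi' with hi' | hi'
            · obtain ⟨p, hp, hw1, hw2⟩ := (hmem x).mpr ⟨i', hi', h1, h2⟩
              rcases List.mem_append.mp hp with hp | hp
              · exact ⟨p, List.mem_append_left _ hp, hw1, hw2⟩
              · simp only [List.mem_singleton] at hp; subst hp
                exact ⟨(s, min (n - 1) (i + 5)), List.mem_append_right _ (by simp),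
                  by simpa using hw1, by simp only; omega⟩
            · simp only [List.mem_singleton] at hi'; rw [hi'] at h1 h2
              exact ⟨(s, min (n - 1) (i + 5)), List.mem_append_right _ (by simp),
                by simp only; omega, by simp only; omega⟩
      · refine ⟨done ++ [(s, e)], max 0 (i - 5), min (n - 1) (i + 5),
          by simp only [pvStepB, hcase, if_false],
          pvChain_snoc hch (by omega) (by omega) (by omega) (by omega),
          ⟨i, by simp, fun i' hi' => ?_, rfl⟩,
          ⟨i, by simp, rfl⟩, ?_⟩
        · rcases List.mem_append.mp hi' with h | h
          · exact le_of_lt (hlt i' h)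
          · simp at h; omega
        · intro x
          constructor
          · rintro ⟨p, hp, h1, h2⟩
            rcases List.mem_append.mp hp with hp | hp
            · obtain ⟨i', hi', hw⟩ := (hmem x).mp ⟨p, hp, h1, h2⟩
              exact ⟨i', List.mem_append_left _ hi', hw⟩
            · simp only [List.mem_singleton] at hp; subst hp
              exact ⟨i, List.mem_append_right _ (by simp), by simpa using h1, by simpa using h2⟩
          · rintro ⟨i', hi', h1, h2⟩
            rcases List.mem_append.mp hi' with hi' | hi'
            · obtain ⟨p, hp, hw1, hw2⟩ := (hmem x).mpr ⟨i', hi', h1, h2⟩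
              exact ⟨p, List.mem_append_left _ hp, hw1, hw2⟩
            · simp only [List.mem_singleton] at hi'; rw [hi'] at h1 h2
              exact ⟨(max 0 (i - 5), min (n - 1) (i + 5)), List.mem_append_right _ (by simp),
                h1, h2⟩

lemma pvWalk_range (lines : List String) : ∀ (k : Nat) (a : Int) (res : List String),
    (PySem.List.pyRange a (a + k) 1).foldl (pvStepA lines) (res, a - 1) =
      (res ++ (PySem.List.pyRange a (a + k) 1).map (fun x => PySem.List.pyGetD lines x ""),
        a - 1 + k) := by
  intro k
  induction k with
  | zero => intro a res; simp
  | succ k ih =>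
    intro a res
    rw [PySem.List.pyRange_one_cons (by push_cast; omega)]
    rw [List.foldl_cons]
    have hstep : pvStepA lines (res, a - 1) a = (res ++ [PySem.List.pyGetD lines a ""], a) := by
      simp [pvStepA]
    rw [hstep]
    have harg : a + ((k + 1 : Nat) : Int) = (a + 1) + (k : Int) := by push_cast; ring
    rw [harg]
    have := ih (a + 1) (res ++ [PySem.List.pyGetD lines a ""])
    rw [show (a + 1) - 1 = a by ring] at this
    rw [this]
    simp [List.append_assoc]

lemma pvWalk_block (lines : List String) (a b : Int) (hab : a ≤ b) (res : List String)
    (last : Int) :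
    (PySem.List.pyRange a (b + 1) 1).foldl (pvStepA lines) (res, last) =
      ((if last ≠ -1 ∧ a - last > 1 then res ++ [pvMarker] else res) ++
        (PySem.List.pyRange a (b + 1) 1).map (fun x => PySem.List.pyGetD lines x ""), b) := by
  rw [PySem.List.pyRange_one_cons (by omega)]
  rw [List.foldl_cons]
  have hstep : pvStepA lines (res, last) a =
      ((if last ≠ -1 ∧ a - last > 1 then res ++ [pvMarker] else res) ++
        [PySem.List.pyGetD lines a ""], a) := by
    simp [pvStepA]
  rw [hstep]
  have harg : b + 1 = (a + 1) + ((b - a).toNat : Int) := by omega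
  rw [harg]
  have := pvWalk_range lines (b - a).toNat (a + 1)
    ((if last ≠ -1 ∧ a - last > 1 then res ++ [pvMarker] else res) ++ [PySem.List.pyGetD lines a ""])
  rw [show (a + 1) - 1 = a by ring] at this
  rw [this]
  simp [List.append_assoc]
  omega

/-- A's marker walk over the flattened indices equals B's emitting pass. -/
lemma pvWalk_flat (lines : List String) (n : Int) : ∀ (ivs : List (Int × Int))
    (res : List String) (last : Int), pvChain n ivs →
    (res = [] ∧ last = -1 ∨ res ≠ [] ∧ last ≠ -1 ∧ ∀ p ∈ ivs.head?, last + 1 < p.1) →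
    ((pvFlat ivs).foldl (pvStepA lines) (res, last)).1 = ivs.foldl (pvEmitR lines) res := by
  intro ivs
  induction ivs with
  | nil => intro res last _ _; rfl
  | cons p rest ih =>
    intro res last hch hst
    obtain ⟨hb1, hb2, hb3⟩ := pvChain_bounds hch p (List.mem_cons_self)
    simp only [pvFlat, List.flatMap_cons, List.foldl_append]
    have hblk := pvWalk_block lines p.1 p.2 hb2 res last
    rw [show PySem.List.pyRange p.1 (p.2 + 1) 1 = PySem.List.pyRange p.1 (p.2 + 1) from rfl] at hblk
    rw [hblk]
    have hmk : (if last ≠ -1 ∧ p.1 - last > 1 then res ++ [pvMarker] else res) =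
        (if res = [] then res else res ++ [pvMarker]) := by
      rcases hst with ⟨hres, hlast⟩ | ⟨hres, hlast, hhd⟩
      · subst hres hlast; simp
      · have := hhd p (by simp)
        rw [if_pos ⟨hlast, by omega⟩, if_neg hres]
    rw [hmk]
    have hne : (PySem.List.pyRange p.1 (p.2 + 1) 1).map
        (fun x => PySem.List.pyGetD lines x "") ≠ [] := by
      rw [PySem.List.pyRange_one_cons (by omega)]; simp
    rw [List.foldl_cons]
    have hrec := ih ((if res = [] then res else res ++ [pvMarker]) ++
        (PySem.List.pyRange p.1 (p.2 + 1) 1).map (fun x => PySem.List.pyGetD lines x ""))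
      p.2 (pvChain_tail hch) ?_
    · simp only [pvFlat] at hrec
      rw [hrec]; rfl
    · refine Or.inr ⟨by simp [hne], by omega, ?_⟩
      intro q hq
      match rest, hch, hq with
      | r :: rest', hch, hq =>
        simp only [List.head?_cons, Option.mem_def, Option.some.injEq] at hq
        subst hq
        exact hch.2.1

lemma pvSlice_eq_map (lines : List String) : ∀ (k : Nat) (a : Int), 0 ≤ a →
    a + k ≤ lines.length →
    PySem.List.slice lines (some a) (some (a + k)) =
      (PySem.List.pyRange a (a + k) 1).map (fun x => PySem.List.pyGetD lines x "") := by
  intro k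
  induction k with
  | zero =>
    intro a h0 hlen
    rw [PySem.List.slice_toNat lines h0 (by omega)]
    simp
  | succ k ih =>
    intro a h0 hlen
    have ha : a.toNat < lines.length := by omega
    rw [PySem.List.slice_toNat lines h0 (by omega)]
    rw [List.drop_eq_getElem_cons ha]
    rw [show (a + ((k + 1 : Nat) : Int)).toNat - a.toNat = k + 1 by omega]
    rw [List.take_succ_cons]
    rw [PySem.List.pyRange_one_cons (by push_cast; omega), List.map_cons]
    congr 1
    · rw [PySem.List.pyGetD_eq_getElem lines "" h0 (by omega)]
    · have harg : a + ((k + 1 : Nat) : Int) = (a + 1) + (k : Int) := by push_cast; ring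
      rw [harg]
      have := ih (a + 1) (by omega) (by omega)
      rw [PySem.List.slice_toNat lines (by omega) (by omega)] at this
      rw [show ((a + 1) + (k : Nat)).toNat - (a + 1).toNat = k by omega,
        show (a + 1).toNat = a.toNat + 1 by omega] at this
      exact this

lemma pvEmit_eq_emitR (lines : List String) {n : Int} (ivs : List (Int × Int))
    (hch : pvChain n ivs) (hn : n = lines.length) (res : List String) :
    ivs.foldl (pvEmit lines) res = ivs.foldl (pvEmitR lines) res := by
  refine PySem.List.foldl_congr_mem ivs _ _ res ?_
  intro acc p hp
  obtain ⟨h1, h2, h3⟩ := pvChain_bounds hch p hp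
  unfold pvEmit pvEmitR
  congr 1
  have harg : p.2 + 1 = p.1 + ((p.2 + 1 - p.1).toNat : Int) := by omega
  rw [harg]
  exact pvSlice_eq_map lines _ p.1 h1 (by omega)

-- ===== VERDICT (by name: the statement is the Claim_ definition above) =====
theorem normalize_logs_spec : Claim_equal_normalize_logs := by
  intro raw_log max_lines _
  unfold Spec_normalize_logs normalize_logs normalize_logs_alt
  simp only []
  by_cases hlen : PySem.List.len ((PySem.Str.split? raw_log "\n").getD []) ≤ max_lines
  · rw [if_pos hlen, if_pos hlen]
  · rw [if_neg hlen, if_neg hlen]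
    set lines := (PySem.Str.split? raw_log "\n").getD [] with hlines
    set n := PySem.List.len lines with hn
    set P : Int × String → Bool := fun p => pvIndicators.any (fun ind => PySem.Str.isIn ind p.2)
      with hP
    set rel : List Int := ((PySem.List.enumerate lines).filter P).map (·.1) with hrel
    have hB : (PySem.List.enumerate lines).foldl
        (fun (st : List (Int × Int) × Option (Int × Int)) p =>
          if P p then
            let s := max 0 (p.1 - 5)
            let e := min (n - 1) (p.1 + 5)
            match st.2 with
            | some c => if s ≤ c.2 + 1 then (st.1, some (c.1, e)) else (st.1 ++ [c], some (s, e))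
            | none => (st.1, some (s, e))
          else st) ([], none) = rel.foldl (pvStepB n) ([], none) := by
      rw [show (fun (st : List (Int × Int) × Option (Int × Int)) (p : Int × String) =>
          if P p then
            let s := max 0 (p.1 - 5)
            let e := min (n - 1) (p.1 + 5)
            match st.2 with
            | some c => if s ≤ c.2 + 1 then (st.1, some (c.1, e)) else (st.1 ++ [c], some (s, e))
            | none => (st.1, some (s, e))
          else st) =
        (fun st p => if P p = true then pvStepB n st p.1 else st) from rfl]
      rw [PySem.List.foldl_if_eq_foldl_filter P (fun st p => pvStepB n st p.1)]
      rw [hrel, List.foldl_map]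
    rw [hB]
    have hbd : ∀ i ∈ rel, 0 ≤ i ∧ i < n := by
      intro i hi
      obtain ⟨p, hp, rfl⟩ := List.mem_map.mp hi
      have hp' := List.mem_of_mem_filter hp
      obtain ⟨k, hk, rfl⟩ := (PySem.List.mem_enumerate_iff lines 0 p).mp hp'
      rw [hn, PySem.List.len_eq]
      simp only [zero_add]
      omega
    have hs : rel.Pairwise (· < ·) := by
      refine List.pairwise_map.mpr ?_
      exact (PySem.List.pairwise_lt_enumerate lines 0).filter _
    rcases eq_or_ne rel [] with hnil | hne
    · rw [if_pos hnil, hnil]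
      rfl
    · rw [if_neg hne]
      obtain ⟨done, s, e, hfold, hch, -, -, hmem⟩ := pvMerge_inv n rel hs hbd hne
      rw [hfold]
      dsimp only
      rw [show (fun (sel : PySem.Set Int) (idx : Int) =>
          List.foldl (fun sel i => sel.add i) sel
            (PySem.List.pyRange (max 0 (idx - 5)) (min n (idx + 5 + 1)))) =
        (fun (sel : PySem.Set Int) (idx : Int) => (pvWin n idx).foldl PySem.Set.add sel) from rfl]
      -- A's selected set and its sorted form
      have hsorted : PySem.List.sorted
          (rel.foldl (fun sel idx => (pvWin n idx).foldl PySem.Set.add sel) PySem.Set.empty)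
          (fun x => x) false = pvFlat (done ++ [(s, e)]) := by
        have hpair := pairwise_pvFlat (n := n) hch
        have hnodupF : (pvFlat (done ++ [(s, e)])).Nodup := hpair.imp ne_of_lt
        have hnodupS := nodup_pvSelected n rel PySem.Set.empty List.nodup_nil
        refine PySem.List.sorted_eq_of_perm_of_pairwise_lt _ _ _
          ((List.perm_ext_iff_of_nodup hnodupF hnodupS).mpr ?_) hpair
        intro x
        rw [mem_pvFlat, mem_pvSelected, hmem x]
        simp only [pvWin, PySem.List.mem_pyRange_one]
        constructor
        · rintro ⟨i, hi, h1, h2⟩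
          exact Or.inr ⟨i, hi, by omega, by omega⟩
        · rintro (hx | ⟨i, hi, hw1, hw2⟩)
          · exact absurd hx (List.not_mem_nil)
          · exact ⟨i, hi, by omega, by omega⟩
      have hstepA : (fun (st : List String × Int) (idx : Int) =>
          ((if st.2 ≠ -1 ∧ idx - st.2 > 1 then st.1 ++ ["... (truncated) ..."] else st.1) ++
            [PySem.List.pyGetD lines idx ""], idx)) = pvStepA lines := rfl
      have hwalk := pvWalk_flat lines n (done ++ [(s, e)]) [] (-1) hch (Or.inl ⟨rfl, rfl⟩)
      have hemit := pvEmit_eq_emitR lines (done ++ [(s, e)]) hch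
        (by rw [hn, PySem.List.len_eq]) []
      have hEB : (fun (res : List String) (p : Int × Int) =>
          (if res = [] then res else res ++ ["... (truncated) ..."]) ++
            PySem.List.slice lines (some p.1) (some (p.2 + 1))) = pvEmit lines := rfl
      rw [hsorted, hstepA, hwalk, hEB, hemit]
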